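-- pv_equiv track=rewrite | github.com/miya9209-prog/miya-ai-v1 | app.py | pick_from_korean
-- ===== SOURCE A (Python) =====
-- def pick_from_korean(weight, options):
--     order = ["44", "55", "55반", "66", "66반", "77", "77반", "88"]
--     available = [x for x in order if any(x == o or x in o for o in options)]
--     if not available:
--         return options[0]
--
--     if weight <= 47:
--         target = "44"
--     elif weight <= 53:
--         target = "55"
--     elif weight <= 56:
--         target = "55반"
--     elif weight <= 61:
--         target = "66"
--     elif weight <= 65:
--         target = "66반"
--     elif weight <= 70:
--         target = "77"
--     elif weight <= 74:
--         target = "77반"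
--     else:
--         target = "88"
--
--     return target if target in available else available[-1]
-- ===== SOURCE B (Python) =====
-- def pick_from_korean(weight, options):
--     order = ["44", "55", "55반", "66", "66반", "77", "77반", "88"]
--     thresholds = [47, 53, 56, 61, 65, 70, 74]
--     available = [x for x in order if any(x == o or x in o for o in options)]
--     if not available:
--         return options[0]
--     # binary search: number of thresholds strictly below weight
--     lo, hi = 0, len(thresholds)
--     while lo < hi:
--         mid = (lo + hi) // 2
--         if thresholds[mid] < weight:
--             lo = mid + 1
--         else:
--             hi = mid
--     target = order[lo]
--     return target if target in available else available[-1]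
-- ===== Notes on version B (the rewrite author's own statement) =====
-- stated objective: alternative
-- what changed: Replaced A's 7-way if/elif weight cascade with a threshold table [47,53,56,61,65,70,74] searched by a hand-written bisect_left binary search that indexes into the size list.
-- outside the precondition, e.g. on pick_from_korean(50, []): A raises IndexError, B raises IndexError
import Mathlib
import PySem

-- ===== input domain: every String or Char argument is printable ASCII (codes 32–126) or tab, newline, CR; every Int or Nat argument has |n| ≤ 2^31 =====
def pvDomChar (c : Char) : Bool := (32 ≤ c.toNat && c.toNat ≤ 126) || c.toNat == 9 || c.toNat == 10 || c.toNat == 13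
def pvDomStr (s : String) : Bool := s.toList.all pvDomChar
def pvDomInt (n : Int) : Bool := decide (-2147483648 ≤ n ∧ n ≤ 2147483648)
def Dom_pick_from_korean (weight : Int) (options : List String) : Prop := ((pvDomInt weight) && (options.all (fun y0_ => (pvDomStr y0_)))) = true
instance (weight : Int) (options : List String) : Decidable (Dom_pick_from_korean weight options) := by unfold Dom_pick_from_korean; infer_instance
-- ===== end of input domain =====

-- B replaces A's 7-way if/elif cascade by a threshold table searched with a hand-written
-- binary search (bisect_left); objective: alternative (data-table) decomposition, same cost.

-- ===== PORT A =====
def pvOrder : List String := ["44", "55", "55반", "66", "66반", "77", "77반", "88"]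

def pvAvailable (options : List String) : List String :=
  pvOrder.filter (fun x => options.any (fun o => x == o || PySem.Str.isIn x o))

-- A's if/elif cascade, verbatim
def pvCascade (weight : Int) : String :=
  if weight ≤ 47 then "44"
  else if weight ≤ 53 then "55"
  else if weight ≤ 56 then "55반"
  else if weight ≤ 61 then "66"
  else if weight ≤ 65 then "66반"
  else if weight ≤ 70 then "77"
  else if weight ≤ 74 then "77반"
  else "88"

def pick_from_korean (weight : Int) (options : List String) : String :=
  let available := pvAvailable options
  if available.isEmpty then (PySem.List.pyGet? options 0).getD ""  -- options[0]; Pre_ excludes the raising case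
  else
    let target := pvCascade weight
    if available.contains target then target else available.getLastD ""

-- ===== PORT B =====
def pvThresholds : List Int := [47, 53, 56, 61, 65, 70, 74]

-- hand-written bisect_left loop from Source B
def pvBisect (weight : Int) (lo hi : Nat) : Nat :=
  if lo < hi then
    let mid := (lo + hi) / 2
    if pvThresholds.getD mid 0 < weight then pvBisect weight (mid + 1) hi
    else pvBisect weight lo mid
  else lo
termination_by hi - lo
decreasing_by all_goals omega

def pick_from_korean_alt (weight : Int) (options : List String) : String :=
  let available := pvAvailable options
  if available.isEmpty then (PySem.List.pyGet? options 0).getD ""  -- options[0]; Pre_ excludes the raising case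
  else
    let target := (PySem.List.pyGet? pvOrder (pvBisect weight 0 pvThresholds.length)).getD ""
    if available.contains target then target else available.getLastD ""

-- ===== PRECONDITION & SPEC =====
-- Pre_ excludes exactly options = [], where A raises IndexError at options[0] (B raises too).
def Pre_pick_from_korean (weight : Int) (options : List String) : Prop := options ≠ []
instance (weight : Int) (options : List String) : Decidable (Pre_pick_from_korean weight options) := by unfold Pre_pick_from_korean; infer_instance

def pvWitness_pick_from_korean : Int × List String := (50, ["55"])

def Spec_pick_from_korean (weight : Int) (options : List String) (out : String) : Prop := out = pick_from_korean_alt weight options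
instance (weight : Int) (options : List String) (out : String) : Decidable (Spec_pick_from_korean weight options out) := by unfold Spec_pick_from_korean; infer_instance

-- ===== CLAIM (what is proved, stated in full; the proofs are below) =====
def Claim_equal_pick_from_korean : Prop := ∀ (weight : Int) (options : List String), Dom_pick_from_korean weight options → Pre_pick_from_korean weight options → Spec_pick_from_korean weight options (pick_from_korean weight options)

-- ===== LEMMAS AND PROOFS =====
lemma pvBisect_step (w : Int) (lo hi : Nat) (h : lo < hi) :
    pvBisect w lo hi = if pvThresholds.getD ((lo+hi)/2) 0 < w
      then pvBisect w ((lo+hi)/2+1) hi else pvBisect w lo ((lo+hi)/2) := by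
  rw [pvBisect]; simp [h]

lemma pvBisect_end (w : Int) (lo hi : Nat) (h : ¬ lo < hi) : pvBisect w lo hi = lo := by
  rw [pvBisect]; simp [h]

-- the binary search over the threshold table picks the same size as A's cascade
lemma pvTarget_eq (weight : Int) :
    pvCascade weight = (PySem.List.pyGet? pvOrder (pvBisect weight 0 pvThresholds.length)).getD "" := by
  have h : pvBisect weight 0 7 =
      if weight ≤ 47 then 0 else if weight ≤ 53 then 1 else if weight ≤ 56 then 2
      else if weight ≤ 61 then 3 else if weight ≤ 65 then 4 else if weight ≤ 70 then 5
      else if weight ≤ 74 then 6 else 7 := by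
    split_ifs with h1 h2 h3 h4 h5 h6 h7 <;>
    · repeat (first
        | (rw [pvBisect_step _ _ _ (by decide)]; norm_num [pvThresholds];
           first | rw [if_pos (by omega)] | rw [if_neg (by omega)])
        | rw [pvBisect_end _ _ _ (by decide)])
  show pvCascade weight = (PySem.List.pyGet? pvOrder (pvBisect weight 0 (7 : Nat))).getD ""
  rw [h]
  unfold pvCascade
  split_ifs <;> rfl

-- ===== VERDICT (by name: the statement is the Claim_ definition above) =====
theorem pick_from_korean_spec : Claim_equal_pick_from_korean := by
  intro weight options _ _
  show pick_from_korean weight options = pick_from_korean_alt weight options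
  unfold pick_from_korean pick_from_korean_alt
  rw [pvTarget_eq]
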